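-- pv_equiv track=rewrite | github.com/paytonlowe9812/Kalshi-App-Repo | PredictionMarketApp/backend/kalshi/websocket.py | _normalize_pem
-- ===== SOURCE A (Python) =====
-- def _normalize_pem(pem_text: str) -> str:
--     text = pem_text.strip()
--     for kind in ("RSA PRIVATE KEY", "PRIVATE KEY", "EC PRIVATE KEY"):
--         header = f"-----BEGIN {kind}-----"
--         footer = f"-----END {kind}-----"
--         if header in text and footer in text:
--             start = text.index(header) + len(header)
--             end = text.index(footer)
--             b64 = text[start:end].replace("\n", "").replace("\r", "").replace(" ", "")
--             lines = [b64[i : i + 64] for i in range(0, len(b64), 64)]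
--             return header + "\n" + "\n".join(lines) + "\n" + footer + "\n"
--     return text
-- ===== SOURCE B (Python) =====
-- def _chunk64(s):
--     chunks = []
--     while s:
--         chunks.append(s[:64])
--         s = s[64:]
--     return chunks
--
--
-- def _normalize_pem(pem_text: str) -> str:
--     text = pem_text.strip()
--     for kind in ("RSA PRIVATE KEY", "PRIVATE KEY", "EC PRIVATE KEY"):
--         header = f"-----BEGIN {kind}-----"
--         footer = f"-----END {kind}-----"
--         h = text.find(header)
--         e = text.find(footer)
--         if h >= 0 and e >= 0:
--             body = "".join(c for c in text[h + len(header):e] if c not in "\n\r ")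
--             return header + "\n" + "\n".join(_chunk64(body)) + "\n" + footer + "\n"
--     return text
-- ===== Notes on version B (the rewrite author's own statement) =====
-- stated objective: alternative
-- what changed: Replaces the membership-test-plus-index double scans with single find() calls checked against -1, the chain of three replace() passes that delete newline, carriage-return and space with one character-filter pass, and the range-step-64 slicing comprehension with an explicit while-loop chunker.
import Mathlib
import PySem

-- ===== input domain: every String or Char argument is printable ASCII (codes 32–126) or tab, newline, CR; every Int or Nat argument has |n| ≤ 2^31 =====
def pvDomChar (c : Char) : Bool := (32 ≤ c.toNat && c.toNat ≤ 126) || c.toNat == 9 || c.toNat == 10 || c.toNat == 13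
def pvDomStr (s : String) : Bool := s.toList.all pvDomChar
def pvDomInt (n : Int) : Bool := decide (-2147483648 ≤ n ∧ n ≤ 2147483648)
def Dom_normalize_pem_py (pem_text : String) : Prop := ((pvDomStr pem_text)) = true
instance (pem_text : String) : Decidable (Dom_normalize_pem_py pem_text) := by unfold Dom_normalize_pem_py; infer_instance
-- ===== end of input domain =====

-- B replaces A's membership+index scans by find() with -1 checks, the replace-chain by one
-- character filter, and the range-slicing comprehension by a while-loop chunker (objective: alternative).

-- ===== PORT A =====
-- one attempt of A's loop body for a single kind; `text.index(header)` is ported as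
-- `Chars.find text header`, exact here because the branch is guarded by `header in text`
def pvTryA (text kind : List Char) : Option (List Char) :=
  let header := "-----BEGIN ".toList ++ kind ++ "-----".toList
  let footer := "-----END ".toList ++ kind ++ "-----".toList
  if (PySem.Chars.isIn header text && PySem.Chars.isIn footer text) = true then
    let start := PySem.Chars.find text header + (header.length : Int)
    let e := PySem.Chars.find text footer
    let b64 := PySem.Chars.replace (PySem.Chars.replace (PySem.Chars.replace
                 (PySem.List.slice text (some start) (some e)) ['\n'] []) ['\r'] []) [' '] []
    let lines := (PySem.List.pyRange 0 (b64.length : Int) 64).map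
                   (fun i => PySem.List.slice b64 (some i) (some (i + 64)))
    some (header ++ '\n' :: (PySem.Chars.join ['\n'] lines ++ '\n' :: footer ++ ['\n']))
  else none

def normalize_pem_py (pem_text : String) : String :=
  let text := PySem.Chars.strip pem_text.toList
  match pvTryA text "RSA PRIVATE KEY".toList with
  | some r => String.ofList r
  | none =>
    match pvTryA text "PRIVATE KEY".toList with
    | some r => String.ofList r
    | none =>
      match pvTryA text "EC PRIVATE KEY".toList with
      | some r => String.ofList r
      | none => String.ofList text

-- ===== PORT B =====
-- the while-loop of Source B's _chunk64, with its accumulator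
def pvChunkB (cs : List Char) (acc : List (List Char)) : List (List Char) :=
  if cs.isEmpty then acc else pvChunkB (cs.drop 64) (acc ++ [cs.take 64])
termination_by cs.length
decreasing_by
  simp only [List.isEmpty_iff] at *
  have : cs.length ≠ 0 := by simpa [List.length_eq_zero_iff] using ‹cs ≠ []›
  simp [List.length_drop]; omega

-- one attempt of B's loop body; `''.join(c for c in seg if c not in "\n\r ")` is ported
-- as the character filter it performs
def pvTryB (text kind : List Char) : Option (List Char) :=
  let header := "-----BEGIN ".toList ++ kind ++ "-----".toList
  let footer := "-----END ".toList ++ kind ++ "-----".toList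
  let h := PySem.Chars.find text header
  let e := PySem.Chars.find text footer
  if 0 ≤ h ∧ 0 ≤ e then
    let body := (PySem.List.slice text (some (h + (header.length : Int))) (some e)).filter
                  (fun c => !(c == '\n' || c == '\r' || c == ' '))
    some (header ++ '\n' :: (PySem.Chars.join ['\n'] (pvChunkB body []) ++ '\n' :: footer ++ ['\n']))
  else none

def normalize_pem_py_alt (pem_text : String) : String :=
  let text := PySem.Chars.strip pem_text.toList
  match pvTryB text "RSA PRIVATE KEY".toList with
  | some r => String.ofList r
  | none =>
    match pvTryB text "PRIVATE KEY".toList with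
    | some r => String.ofList r
    | none =>
      match pvTryB text "EC PRIVATE KEY".toList with
      | some r => String.ofList r
      | none => String.ofList text

-- ===== PRECONDITION & SPEC =====
def Spec_normalize_pem_py (pem_text : String) (out : String) : Prop := out = normalize_pem_py_alt pem_text
instance (pem_text : String) (out : String) : Decidable (Spec_normalize_pem_py pem_text out) := by unfold Spec_normalize_pem_py; infer_instance

-- ===== CLAIM (what is proved, stated in full; the proofs are below) =====
def Claim_equal_normalize_pem_py : Prop := ∀ (pem_text : String), Dom_normalize_pem_py pem_text → Spec_normalize_pem_py pem_text (normalize_pem_py pem_text)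

-- ===== LEMMAS AND PROOFS =====

-- replace with a one-char pattern and empty replacement is a character filter
theorem replace_go_single (c : Char) : ∀ (fuel : Nat) (l acc : List Char), l.length ≤ fuel →
    PySem.Chars.replace.go [c] [] fuel l acc = acc.reverse ++ l.filter (fun x => x != c) := by
  intro fuel
  induction fuel with
  | zero =>
    intro l acc hl
    have : l = [] := by cases l <;> simp_all
    subst this
    simp [PySem.Chars.replace.go]
  | succ n ih =>
    intro l acc hl
    cases l with
    | nil => simp [PySem.Chars.replace.go]
    | cons x t =>
      by_cases hx : x = c
      · subst hx
        have : [x].isPrefixOf (x :: t) = true := by simp [List.isPrefixOf]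
        simp only [PySem.Chars.replace.go, this, if_pos]
        rw [ih _ _ (by simpa using Nat.le_of_succ_le_succ hl)]
        simp
      · have : [c].isPrefixOf (x :: t) = false := by simp [List.isPrefixOf]; exact fun h => absurd h.symm hx
        simp only [PySem.Chars.replace.go, this]
        rw [if_neg (by simp)]
        rw [ih _ _ (by simpa using Nat.le_of_succ_le_succ hl)]
        simp [hx]

theorem replace_single_eq_filter (s : List Char) (c : Char) :
    PySem.Chars.replace s [c] [] = s.filter (fun x => x != c) := by
  rw [PySem.Chars.replace]
  simp only [List.isEmpty_cons, Bool.false_eq_true]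
  simpa using replace_go_single c s.length s [] (le_refl _)

theorem replace_chain_eq_filter (s : List Char) :
    PySem.Chars.replace (PySem.Chars.replace (PySem.Chars.replace s ['\n'] []) ['\r'] []) [' '] []
      = s.filter (fun c => !(c == '\n' || c == '\r' || c == ' ')) := by
  simp only [replace_single_eq_filter, List.filter_filter]
  apply List.filter_congr
  intro x _
  cases h1 : x == '\n' <;> cases h2 : x == '\r' <;> cases h3 : x == ' ' <;> simp_all [bne]

-- A's range-step-64 slicing comprehension equals B's while-loop chunker
theorem chunkB_append_aux : ∀ (n : Nat) (cs : List Char), cs.length ≤ n →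
    ∀ acc, pvChunkB cs acc = acc ++ pvChunkB cs [] := by
  intro n
  induction n with
  | zero =>
    intro cs hcs acc
    have : cs = [] := by cases cs <;> simp_all
    subst this
    simp [pvChunkB]
  | succ n ih =>
    intro cs hcs acc
    by_cases hemp : cs.isEmpty
    · have : cs = [] := by simpa [List.isEmpty_iff] using hemp
      subst this
      simp [pvChunkB]
    · have hne : cs ≠ [] := by simpa [List.isEmpty_iff] using hemp
      have hlen : 1 ≤ cs.length := by
        cases cs with | nil => exact absurd rfl hne | cons a t => simp
      have hd : (cs.drop 64).length ≤ n := by simp [List.length_drop]; omega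
      rw [pvChunkB, if_neg (by simp [hemp])]
      conv_rhs => rw [pvChunkB, if_neg (by simp [hemp])]
      rw [ih _ hd, ih _ hd ([] ++ [cs.take 64])]
      simp

theorem chunkB_append (cs : List Char) (acc : List (List Char)) :
    pvChunkB cs acc = acc ++ pvChunkB cs [] :=
  chunkB_append_aux cs.length cs le_rfl acc

theorem range_map_eq_chunkB_aux : ∀ (n : Nat) (cs : List Char), cs.length ≤ n →
    (List.range ((cs.length + 63) / 64)).map (fun k => (cs.drop (64 * k)).take 64) = pvChunkB cs [] := by
  intro n
  induction n with
  | zero =>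
    intro cs hcs
    have : cs = [] := by cases cs <;> simp_all
    subst this
    simp [pvChunkB]
  | succ n ih =>
    intro cs hcs
    by_cases hemp : cs.isEmpty
    · have : cs = [] := by simpa [List.isEmpty_iff] using hemp
      subst this
      simp [pvChunkB]
    · have hne : cs ≠ [] := by simpa [List.isEmpty_iff] using hemp
      have hlen : 1 ≤ cs.length := by
        cases cs with | nil => exact absurd rfl hne | cons a t => simp
      have hd : (cs.drop 64).length ≤ n := by simp [List.length_drop]; omega
      have hdl : (cs.drop 64).length = cs.length - 64 := by simp
      have hcnt : (cs.length + 63) / 64 = ((cs.drop 64).length + 63) / 64 + 1 := by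
        rw [hdl]; omega
      rw [hcnt, List.range_succ_eq_map]
      rw [pvChunkB, if_neg (by simp [hemp]), chunkB_append]
      simp only [List.map_cons, List.map_map, Nat.mul_zero, List.drop_zero, List.nil_append]
      congr 1
      rw [← ih _ hd]
      apply List.map_congr_left
      intro k _
      simp only [Function.comp]
      rw [List.drop_drop]
      congr 2
      omega

theorem lines_eq_chunkB (b64 : List Char) :
    (PySem.List.pyRange 0 (b64.length : Int) 64).map
      (fun i => PySem.List.slice b64 (some i) (some (i + 64))) = pvChunkB b64 [] := by
  rw [← range_map_eq_chunkB_aux b64.length b64 le_rfl]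
  rw [PySem.List.pyRange]
  rw [if_neg (by norm_num)]
  have hcount : (if (0:Int) < 64 then if (0:Int) < (b64.length : Int) then (((b64.length : Int) - 0 + 64 - 1) / 64).toNat else 0
      else if (b64.length : Int) < 0 then ((0 - (b64.length : Int) + -64 - 1) / -64).toNat else 0) = (b64.length + 63) / 64 := by
    rw [if_pos (by norm_num)]
    by_cases hb : (0:Int) < (b64.length : Int)
    · rw [if_pos hb]
      omega
    · rw [if_neg hb]
      have : b64.length = 0 := by omega
      simp [this]
  rw [hcount, List.map_map]
  apply List.map_congr_left
  intro k _
  simp only [Function.comp]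
  have : (0 : Int) + 64 * (k : Int) = ((64 * k : Nat) : Int) := by push_cast; ring
  rw [this]
  rw [show ((64 * k : Nat) : Int) + 64 = ((64 * k : Nat) : Int) + ((64 : Nat) : Int) from by norm_num]
  rw [PySem.List.slice_natCast_add]

-- the two per-kind attempts agree
theorem tryA_eq_tryB (text kind : List Char) : pvTryA text kind = pvTryB text kind := by
  rw [pvTryA, pvTryB]
  cases hh : PySem.Chars.isIn ("-----BEGIN ".toList ++ kind ++ "-----".toList) text with
  | true =>
    cases hf : PySem.Chars.isIn ("-----END ".toList ++ kind ++ "-----".toList) text with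
    | true =>
      rw [if_pos (by decide)]
      rw [if_pos ⟨(PySem.Chars.find_nonneg_iff _ _).2 ((PySem.Chars.isIn_iff_infix _ _).1 hh),
                  (PySem.Chars.find_nonneg_iff _ _).2 ((PySem.Chars.isIn_iff_infix _ _).1 hf)⟩]
      simp only [replace_chain_eq_filter, lines_eq_chunkB]
    | false =>
      rw [if_neg (by decide)]
      rw [if_neg (by
        rintro ⟨-, h2⟩
        have := (PySem.Chars.isIn_iff_infix _ _).2 ((PySem.Chars.find_nonneg_iff _ _).1 h2)
        rw [hf] at this
        exact Bool.false_ne_true this)]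
  | false =>
    rw [if_neg (by simp)]
    rw [if_neg (by
      rintro ⟨h1, -⟩
      have := (PySem.Chars.isIn_iff_infix _ _).2 ((PySem.Chars.find_nonneg_iff _ _).1 h1)
      rw [hh] at this
      exact Bool.false_ne_true this)]

-- ===== VERDICT (by name: the statement is the Claim_ definition above) =====
theorem normalize_pem_py_spec : Claim_equal_normalize_pem_py := by
  intro pem_text _
  unfold Spec_normalize_pem_py normalize_pem_py normalize_pem_py_alt
  simp only [tryA_eq_tryB]
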